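-- pv_equiv track=rewrite | github.com/yichang1983/work | Topology-10.py | insert_after_marker
-- ===== SOURCE A (Python) =====
-- from typing import List, Tuple, Set, Dict
--
-- def insert_after_marker(lines: List[str], marker: str, insert_lines: List[str]):
--     """在第一個包含 marker 的行後面插入多行內容"""
--     new_lines = []
--     inserted = False
--     for line in lines:
--         new_lines.append(line.rstrip("\n"))
--         if (not inserted) and (marker in line):
--             is_edge_marker = "edge" in marker.lower()
--
--             for item in insert_lines:
--                 if is_edge_marker:
--                     new_lines.append(item)
--                 else:
--                     new_lines.append(f'"{item}"')
--             inserted = True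
--     return new_lines
-- ===== SOURCE B (Python) =====
-- def insert_after_marker(lines, marker, insert_lines):
--     """Locate the first marker line, then splice the formatted block in with slices."""
--     base = [l.rstrip("\n") for l in lines]
--     idx = next((i for i, l in enumerate(lines) if marker in l), None)
--     if idx is None:
--         return base
--     if "edge" in marker.lower():
--         formatted = list(insert_lines)
--     else:
--         formatted = [f'"{item}"' for item in insert_lines]
--     return base[:idx + 1] + formatted + base[idx + 1:]
-- ===== Notes on version B (the rewrite author's own statement) =====
-- stated objective: alternative
-- what changed: The flag-guarded loop that interleaves appends is replaced by locate-the-first-marker-index (next/enumerate), then a slice splice base[:idx+1] + formatted + base[idx+1:].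
import Mathlib
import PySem

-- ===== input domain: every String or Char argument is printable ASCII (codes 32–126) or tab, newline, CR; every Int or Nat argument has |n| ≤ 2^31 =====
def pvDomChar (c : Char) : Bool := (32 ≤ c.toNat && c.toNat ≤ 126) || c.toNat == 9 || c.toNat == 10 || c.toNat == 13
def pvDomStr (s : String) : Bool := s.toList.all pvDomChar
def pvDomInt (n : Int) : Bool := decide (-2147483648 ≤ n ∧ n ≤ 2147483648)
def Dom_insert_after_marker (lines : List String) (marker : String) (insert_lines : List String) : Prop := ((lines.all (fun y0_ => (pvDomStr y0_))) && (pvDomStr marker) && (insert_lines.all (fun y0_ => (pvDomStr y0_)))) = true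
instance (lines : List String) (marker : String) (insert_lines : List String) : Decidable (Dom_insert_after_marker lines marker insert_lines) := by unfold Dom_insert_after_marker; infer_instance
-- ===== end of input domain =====

-- B replaces A's flag-guarded interleaved-append loop by finding the first marker index and splicing with slices; objective: alternative decomposition, same cost.


-- shared primitives: Python's s.rstrip("\n") (drop trailing newline chars; exact) and f'"{item}"'
def pvRstripNl (s : String) : String := String.ofList ((s.toList.reverse.dropWhile (fun c => c == '\n')).reverse)
def pvQuote (s : String) : String := String.ofList ('"' :: (s.toList ++ ['"']))

-- ===== PORT A =====
def insert_after_marker (lines : List String) (marker : String) (insert_lines : List String) : List String :=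
  (lines.foldl (fun (st : List String × Bool) line =>
      let new_lines := st.1 ++ [pvRstripNl line]
      if !st.2 && PySem.Str.isIn marker line then
        let is_edge_marker := PySem.Str.isIn "edge" (PySem.Str.lower marker)
        (insert_lines.foldl (fun acc item =>
            if is_edge_marker then acc ++ [item] else acc ++ [pvQuote item]) new_lines, true)
      else (new_lines, st.2)) ([], false)).1

-- ===== PORT B =====
def insert_after_marker_alt (lines : List String) (marker : String) (insert_lines : List String) : List String :=
  let base := lines.map pvRstripNl
  match lines.findIdx? (fun l => PySem.Str.isIn marker l) with
  | none => base
  | some idx =>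
    let formatted :=
      if PySem.Str.isIn "edge" (PySem.Str.lower marker) then insert_lines
      else insert_lines.map pvQuote
    base.take (idx + 1) ++ formatted ++ base.drop (idx + 1)

-- ===== PRECONDITION & SPEC =====
def Spec_insert_after_marker (lines : List String) (marker : String) (insert_lines : List String) (out : List String) : Prop := out = insert_after_marker_alt lines marker insert_lines
instance (lines : List String) (marker : String) (insert_lines : List String) (out : List String) : Decidable (Spec_insert_after_marker lines marker insert_lines out) := by unfold Spec_insert_after_marker; infer_instance

-- ===== CLAIM (what is proved, stated in full; the proofs are below) =====
def Claim_equal_insert_after_marker : Prop := ∀ (lines : List String) (marker : String) (insert_lines : List String), Dom_insert_after_marker lines marker insert_lines → Spec_insert_after_marker lines marker insert_lines (insert_after_marker lines marker insert_lines)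

-- ===== LEMMAS AND PROOFS =====

-- appending one element at a time is mapping
theorem foldl_append_map {α β : Type} (g : α → β) :
    ∀ (l : List α) (acc : List β), l.foldl (fun a x => a ++ [g x]) acc = acc ++ l.map g := by
  intro l
  induction l with
  | nil => intro acc; simp
  | cons x xs ih => intro acc; simp [List.foldl, ih]

-- the A-side inner loop builds exactly B's formatted block
theorem inner_formatted (isEdge : Bool) (ins : List String) (nl : List String) :
    ins.foldl (fun a item => if isEdge then a ++ [item] else a ++ [pvQuote item]) nl =
      nl ++ (if isEdge then ins else ins.map pvQuote) := by
  cases isEdge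
  · simp only [Bool.false_eq_true, if_false]
    exact foldl_append_map pvQuote ins nl
  · simp only [if_true]
    rw [foldl_append_map (fun x => x) ins nl, List.map_id']

-- once inserted = true, the loop just appends the rstripped lines
theorem loop_done (p : String → Bool) (isEdge : Bool) (ins : List String) :
    ∀ (lines : List String) (acc : List String),
      (lines.foldl (fun (st : List String × Bool) line =>
        if !st.2 && p line then
          (ins.foldl (fun a item => if isEdge then a ++ [item] else a ++ [pvQuote item])
            (st.1 ++ [pvRstripNl line]), true)
        else (st.1 ++ [pvRstripNl line], st.2)) (acc, true)).1 = acc ++ lines.map pvRstripNl := by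
  intro lines
  induction lines with
  | nil => intro acc; simp
  | cons x xs ih =>
    intro acc
    simp only [List.foldl, Bool.not_true, Bool.false_and, Bool.false_eq_true, if_false]
    rw [ih]
    simp

-- main invariant for A's loop while inserted = false: locate-then-splice
theorem loop_main (p : String → Bool) (isEdge : Bool) (ins : List String) :
    ∀ (lines : List String) (acc : List String),
      (lines.foldl (fun (st : List String × Bool) line =>
        if !st.2 && p line then
          (ins.foldl (fun a item => if isEdge then a ++ [item] else a ++ [pvQuote item])
            (st.1 ++ [pvRstripNl line]), true)
        else (st.1 ++ [pvRstripNl line], st.2)) (acc, false)).1 =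
      match lines.findIdx? p with
      | none => acc ++ lines.map pvRstripNl
      | some idx => acc ++ ((lines.map pvRstripNl).take (idx + 1)
          ++ (if isEdge then ins else ins.map pvQuote)
          ++ (lines.map pvRstripNl).drop (idx + 1)) := by
  intro lines
  induction lines with
  | nil => intro acc; simp
  | cons x xs ih =>
    intro acc
    by_cases hx : p x = true
    · simp only [List.foldl, Bool.not_false, Bool.true_and, hx, if_true]
      rw [loop_done, inner_formatted]
      simp [List.findIdx?_cons, hx]
    · simp only [List.foldl, Bool.not_false, Bool.true_and, hx, Bool.false_eq_true, if_false]
      rw [ih]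
      simp only [List.findIdx?_cons, hx, Bool.false_eq_true, if_false]
      cases hfind : List.findIdx? p xs with
      | none => simp
      | some i => simp [List.take_succ_cons, List.drop_succ_cons]

-- ===== VERDICT (by name: the statement is the Claim_ definition above) =====
theorem insert_after_marker_spec : Claim_equal_insert_after_marker := by
  intro lines marker insert_lines _
  unfold Spec_insert_after_marker insert_after_marker insert_after_marker_alt
  refine (loop_main (fun l => PySem.Str.isIn marker l)
    (PySem.Str.isIn "edge" (PySem.Str.lower marker)) insert_lines lines []).trans ?_
  cases hfind : List.findIdx? (fun l => PySem.Str.isIn marker l) lines with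
  | none => simp
  | some i => simp
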